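-- pv_equiv track=rewrite | github.com/knoevenagel/Coordination-Chemistry-Database | Utils/FindGA.py | find_shared_atoms
-- ===== SOURCE A (Python) =====
-- def find_shared_atoms(aromatic_rings):
--     """查找所有共享原子的稠环"""
--     shared_atoms = set()
--     for i in range(len(aromatic_rings)):
--         for j in range(i + 1, len(aromatic_rings)):
--             if set(aromatic_rings[i]).intersection(set(aromatic_rings[j])):
--                 shared_atoms.update(aromatic_rings[i])
--                 shared_atoms.update(aromatic_rings[j])
--     return shared_atoms
-- ===== SOURCE B (Python) =====
-- def find_shared_atoms(aromatic_rings):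
--     """查找所有共享原子的稠环"""
--     # One pass builds an atom -> ring-indices index; each ring then finds its
--     # intersecting partners from the index, with no pairwise set intersections.
--     rings_of = {}
--     for i, ring in enumerate(aromatic_rings):
--         for a in set(ring):
--             rings_of.setdefault(a, []).append(i)
--     shared = set()
--     for i, ring in enumerate(aromatic_rings):
--         partners = sorted({j for a in ring for j in rings_of.get(a, []) if j > i})
--         if partners:
--             shared.update(ring)
--             for j in partners:
--                 shared.update(aromatic_rings[j])
--     return shared
-- ===== Notes on version B (the rewrite author's own statement) =====
-- stated objective: alternative
-- what changed: Replaces the all-pairs loop with a per-pair set intersection by a one-pass atom-to-ring-indices inverted index from which each ring reads its later intersecting partners directly.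
import Mathlib
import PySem

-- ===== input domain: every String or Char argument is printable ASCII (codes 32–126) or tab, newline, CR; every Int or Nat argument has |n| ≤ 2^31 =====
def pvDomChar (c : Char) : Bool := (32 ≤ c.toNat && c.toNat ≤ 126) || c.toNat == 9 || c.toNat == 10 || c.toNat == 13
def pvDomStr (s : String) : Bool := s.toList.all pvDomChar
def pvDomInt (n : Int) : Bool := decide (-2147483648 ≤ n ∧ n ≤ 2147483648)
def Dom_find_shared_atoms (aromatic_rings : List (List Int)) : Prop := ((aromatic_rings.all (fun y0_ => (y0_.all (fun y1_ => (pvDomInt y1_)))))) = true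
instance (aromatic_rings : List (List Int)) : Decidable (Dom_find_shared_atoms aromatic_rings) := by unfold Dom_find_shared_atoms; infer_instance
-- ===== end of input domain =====

-- B replaces the all-pairs intersection scan by a one-pass atom→ring-indices inverted index from which each ring reads its intersecting partners (return value is a Python set; port equality is on the modelled first-insertion order).

-- ===== PORT A =====
def find_shared_atoms (aromatic_rings : List (List Int)) : List Int :=
  -- shared_atoms = set(); for i in range(len(..)): for j in range(i+1, len(..)):
  --   if set(rings[i]).intersection(set(rings[j])): shared_atoms.update(rings[i]); shared_atoms.update(rings[j])
  (PySem.List.pyRange 0 (PySem.List.len aromatic_rings) 1).foldl (fun shared i =>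
    (PySem.List.pyRange (i + 1) (PySem.List.len aromatic_rings) 1).foldl (fun shared j =>
      if PySem.Set.inter (PySem.Set.ofList (PySem.List.pyGetD aromatic_rings i []))
           (PySem.Set.ofList (PySem.List.pyGetD aromatic_rings j [])) ≠ [] then
        PySem.Set.update (PySem.Set.update shared (PySem.List.pyGetD aromatic_rings i []))
          (PySem.List.pyGetD aromatic_rings j [])
      else shared) shared) PySem.Set.empty

-- ===== PORT B =====
-- rings_of = {}; for i, ring in enumerate(..): for a in set(ring): rings_of.setdefault(a, []).append(i)
def pvRingsOf (aromatic_rings : List (List Int)) : PySem.Dict Int (List Int) :=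
  (PySem.List.enumerate aromatic_rings).foldl (fun d p =>
    (PySem.Set.ofList p.2).foldl (fun d a => d.modify a [] (fun l => l ++ [p.1])) d) PySem.Dict.empty

def find_shared_atoms_alt (aromatic_rings : List (List Int)) : List Int :=
  let rings_of := pvRingsOf aromatic_rings
  -- shared = set(); for i, ring in enumerate(..):
  --   partners = sorted({j for a in ring for j in rings_of.get(a, []) if j > i})
  --   if partners: shared.update(ring); for j in partners: shared.update(aromatic_rings[j])
  (PySem.List.enumerate aromatic_rings).foldl (fun shared p =>
    let partners := PySem.List.sorted
      (PySem.Set.ofList (p.2.flatMap (fun a => (rings_of.getD a []).filter (fun j => decide (p.1 < j)))))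
      (fun x => x)
    if partners ≠ [] then
      partners.foldl (fun shared j => PySem.Set.update shared (PySem.List.pyGetD aromatic_rings j []))
        (PySem.Set.update shared p.2)
    else shared) PySem.Set.empty

-- ===== PRECONDITION & SPEC =====
def Spec_find_shared_atoms (aromatic_rings : List (List Int)) (out : List Int) : Prop := out = find_shared_atoms_alt aromatic_rings
instance (aromatic_rings : List (List Int)) (out : List Int) : Decidable (Spec_find_shared_atoms aromatic_rings out) := by unfold Spec_find_shared_atoms; infer_instance

-- ===== CLAIM (what is proved, stated in full; the proofs are below) =====
def Claim_equal_find_shared_atoms : Prop := ∀ (aromatic_rings : List (List Int)), Dom_find_shared_atoms aromatic_rings → Spec_find_shared_atoms aromatic_rings (find_shared_atoms aromatic_rings)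

-- ===== LEMMAS AND PROOFS =====

-- filter a nodup list for one element
theorem pv_filter_beq_of_nodup (l : List Int) (hl : l.Nodup) (a : Int) :
    l.filter (fun x => x == a) = if a ∈ l then [a] else [] := by
  induction l with
  | nil => simp
  | cons x xs ih =>
    rw [List.nodup_cons] at hl
    obtain ⟨hx, hxs⟩ := hl
    by_cases hxa : x = a
    · subst hxa
      simp [ih hxs, hx]
    · simp [hxa, ih hxs, Ne.symm hxa]

-- getD after one ring's inner 'for a in set(ring)' loop
theorem pv_inner_getD (r : List Int) (i : Int) (d : PySem.Dict Int (List Int)) (a : Int) :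
    ((PySem.Set.ofList r).foldl (fun d x => d.modify x [] (fun l => l ++ [i])) d).getD a []
      = d.getD a [] ++ (if a ∈ r then [i] else []) := by
  have h1 : (PySem.Set.ofList r).foldl (fun d x => d.modify x [] (fun l => l ++ [i])) d
      = ((PySem.Set.ofList r).map (fun x => (x, i))).foldl
          (fun d p => d.modify p.1 [] (fun l => l ++ [p.2])) d := by
    rw [List.foldl_map]
  rw [h1, PySem.Dict.getD_foldl_modify_append]
  congr 1
  rw [List.filter_map]
  have h2 : ((fun p : Int × Int => p.1 == a) ∘ fun x => (x, i)) = fun x => x == a := rfl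
  rw [h2, pv_filter_beq_of_nodup _ (PySem.Set.nodup_ofList r) a]
  by_cases ha : a ∈ r <;> simp [ha, PySem.Set.mem_ofList]

-- characterisation of the inverted index
theorem pv_ringsOf_getD (rs : List (List Int)) (a : Int) :
    (pvRingsOf rs).getD a []
      = ((PySem.List.enumerate rs).filter (fun p => decide (a ∈ p.2))).map (fun p => p.1) := by
  have key : ∀ (l : List (List Int)) (s : Int) (d : PySem.Dict Int (List Int)),
      ((PySem.List.enumerate l s).foldl (fun d p =>
          (PySem.Set.ofList p.2).foldl (fun d a => d.modify a [] (fun l => l ++ [p.1])) d) d).getD a []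
        = d.getD a [] ++ ((PySem.List.enumerate l s).filter (fun p => decide (a ∈ p.2))).map (fun p => p.1) := by
    intro l
    induction l with
    | nil => intro s d; simp [PySem.List.enumerate_nil]
    | cons r rest ih =>
      intro s d
      rw [PySem.List.enumerate_cons]
      simp only [List.foldl_cons, List.filter_cons]
      rw [ih, pv_inner_getD]
      by_cases ha : a ∈ r <;> simp [ha]
  have := key rs 0 PySem.Dict.empty
  simpa [pvRingsOf] using this

-- membership in the gathered partner indices
theorem pv_mem_ringsOf (rs : List (List Int)) (a j : Int) :
    j ∈ (pvRingsOf rs).getD a [] ↔ ∃ (m : Nat) (_ : m < rs.length), j = (m : Int) ∧ a ∈ rs[m] := by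
  rw [pv_ringsOf_getD]
  simp only [List.mem_map, List.mem_filter, PySem.List.mem_enumerate_iff]
  constructor
  · rintro ⟨p, ⟨⟨m, hm, rfl⟩, hp⟩, rfl⟩
    exact ⟨m, hm, by simpa using hp⟩
  · rintro ⟨m, hm, rfl, ha⟩
    exact ⟨((m : Int), rs[m]), ⟨⟨m, hm, by simp⟩, by simpa using ha⟩, rfl⟩

-- partners(k) = the ascending list of later intersecting ring indices
theorem pv_partners_eq (rs : List (List Int)) (k : Nat) (hk : k < rs.length) :
    PySem.List.sorted
      (PySem.Set.ofList ((rs[k]).flatMap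
        (fun a => ((pvRingsOf rs).getD a []).filter (fun j => decide ((k : Int) < j)))))
      (fun x => x)
    = (PySem.List.pyRange ((k : Int) + 1) (PySem.List.len rs)).filter
        (fun j => decide (PySem.Set.inter (PySem.Set.ofList (PySem.List.pyGetD rs (k : Int) []))
          (PySem.Set.ofList (PySem.List.pyGetD rs j [])) ≠ [])) := by
  apply PySem.List.sorted_eq_of_perm_of_pairwise_lt
  · rw [List.perm_ext_iff_of_nodup ((PySem.List.nodup_pyRange_one _ _).filter _) (PySem.Set.nodup_ofList _)]
    intro j
    rw [List.mem_filter, PySem.List.mem_pyRange_one, PySem.Set.mem_ofList, List.mem_flatMap]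
    simp only [List.mem_filter, pv_mem_ringsOf, decide_eq_true_eq, PySem.List.len_eq]
    constructor
    · rintro ⟨⟨h1, h2⟩, h3⟩
      have hj : ∃ (m : Nat), j = (m : Int) ∧ m < rs.length := by
        refine ⟨j.toNat, by omega, by omega⟩
      rcases hj with ⟨m, rfl, hm⟩
      rcases List.exists_mem_of_ne_nil _ h3 with ⟨a, ha⟩
      rw [PySem.Set.mem_inter, PySem.Set.mem_ofList, PySem.Set.mem_ofList] at ha
      rcases ha with ⟨hai, haj⟩
      rw [PySem.List.pyGetD_natCast, List.getD_eq_getElem _ _ hk] at hai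
      rw [PySem.List.pyGetD_natCast, List.getD_eq_getElem _ _ hm] at haj
      exact ⟨a, hai, ⟨m, hm, rfl, haj⟩, by omega⟩
    · rintro ⟨a, hai, ⟨m, hm, rfl, haj⟩, hkm⟩
      refine ⟨⟨by omega, by omega⟩, List.ne_nil_of_mem (a := a) ?_⟩
      rw [PySem.Set.mem_inter, PySem.Set.mem_ofList, PySem.Set.mem_ofList,
        PySem.List.pyGetD_natCast, PySem.List.pyGetD_natCast,
        List.getD_eq_getElem _ _ hk, List.getD_eq_getElem _ _ hm]
      exact ⟨hai, haj⟩
  · exact ((PySem.List.pairwise_lt_pyRange_one _ _).filter _)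

-- a set already containing every atom of l is unchanged by update
theorem pv_update_of_subset (s : PySem.Set Int) (l : List Int) (h : ∀ x ∈ l, x ∈ s) :
    PySem.Set.update s l = s := by
  rw [PySem.Set.update_eq_append_filter]
  have : (PySem.Set.ofList l).filter (fun y => !PySem.Set.contains s y) = [] := by
    rw [List.filter_eq_nil_iff]
    intro y hy
    have hys : y ∈ s := h y ((PySem.Set.mem_ofList l y).1 hy)
    simpa using hys
  rw [this, List.append_nil]

-- once ri is inside the accumulator the redundant per-pair re-update of ri disappears
theorem pv_foldl_drop_ri (js : List Int) (ri : List Int) (g : Int → List Int)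
    (t : PySem.Set Int) (h : ∀ x ∈ ri, x ∈ t) :
    js.foldl (fun s j => PySem.Set.update (PySem.Set.update s ri) (g j)) t
      = js.foldl (fun s j => PySem.Set.update s (g j)) t := by
  induction js generalizing t with
  | nil => rfl
  | cons j rest ih =>
    simp only [List.foldl_cons]
    rw [pv_update_of_subset t ri h]
    exact ih _ (fun x hx => (PySem.Set.mem_update _ _ _).2 (Or.inl (h x hx)))

theorem pv_inner_shape (js : List Int) (ri : List Int) (g : Int → List Int) (t : PySem.Set Int) :
    js.foldl (fun s j => PySem.Set.update (PySem.Set.update s ri) (g j)) t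
      = if js ≠ [] then js.foldl (fun s j => PySem.Set.update s (g j)) (PySem.Set.update t ri)
        else t := by
  cases js with
  | nil => simp
  | cons j rest =>
    simp only [ne_eq, reduceCtorEq, not_false_eq_true, if_pos, List.foldl_cons]
    exact pv_foldl_drop_ri rest ri g _
      (fun x hx => (PySem.Set.mem_update _ _ _).2
        (Or.inl ((PySem.Set.mem_update _ _ _).2 (Or.inr hx))))

-- a guarded fold is a fold over the filtered list
theorem pv_foldl_guard {S : Type} (l : List Int) (C : Int → Prop) [DecidablePred C]
    (f : S → Int → S) (init : S) :
    l.foldl (fun s j => if C j then f s j else s) init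
      = (l.filter (fun j => decide (C j))).foldl f init := by
  induction l generalizing init with
  | nil => rfl
  | cons x xs ih =>
    simp only [List.foldl_cons, List.filter_cons]
    by_cases h : C x <;> simp [h, ih]

-- ===== VERDICT (by name: the statement is the Claim_ definition above) =====
theorem find_shared_atoms_spec : Claim_equal_find_shared_atoms := by
  intro rs _
  unfold Spec_find_shared_atoms find_shared_atoms find_shared_atoms_alt
  rw [PySem.List.enumerate_eq_map_pyRange rs [], List.foldl_map]
  apply PySem.List.foldl_congr_mem
  intro acc j hj
  rw [PySem.List.mem_pyRange_one] at hj
  simp only [PySem.List.len_eq] at hj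
  obtain ⟨m, rfl, hmlt⟩ : ∃ m : Nat, j = (m : Int) ∧ m < rs.length :=
    ⟨j.toNat, by omega, by omega⟩
  simp only [PySem.List.pyGetD_natCast, List.getD_eq_getElem _ _ hmlt]
  rw [pv_foldl_guard, pv_inner_shape]
  have hp := pv_partners_eq rs m hmlt
  simp only [PySem.List.pyGetD_natCast, List.getD_eq_getElem _ _ hmlt] at hp
  rw [hp]
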